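-- pv_equiv track=rewrite | github.com/lebaku01/cs360priv | src/exercises/hashing/hashing.py | hash_folding
-- ===== SOURCE A (Python) =====
-- def hash_folding(key: str, size: int) -> int:
--     """
--     Finds hash using folding method
--
--     :param key: key to hash
--     :param size: size of the collection
--     :return: hash value
--
--     >>> hash_folding('(123) 456-7890', 7)
--     4
--     >>> hash_folding(424-7-23, 8)
--     3
--     """
--     key = str(key)  # cast to string so I can index the input
--     index = 0
--     pairs = []
--     numbers = 0
--     while index < len(str(key)):  # parse the string, build a list of strings of only pairs of digits
--         if key[index].isnumeric() and (numbers + 1) % 2 != 0: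
--             pairs.append([key[index]])
--             numbers += 1
--         elif key[index].isnumeric():
--             pairs[len(pairs) - 1][0] += key[index]
--             numbers += 1
--         else:  # key[index] is non-numeric
--             pass  # do nothing
--         index += 1
--
--     string_sum = 0  # the list now looks something like ['12','34','5'], now we sum up the strings
--     for pair in pairs:
--         string_sum += int(pair[0])
--     return string_sum % size  # take mod and return
-- ===== SOURCE B (Python) =====
-- def hash_folding(key: str, size: int) -> int:
--     key = str(key)
--     digits = [c for c in key if c.isnumeric()]
--     total = 0
--     while digits:
--         total += int(''.join(digits[:2]))
--         digits = digits[2:]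
--     return total % size
-- ===== Notes on version B (the rewrite author's own statement) =====
-- stated objective: simpler
-- what changed: Replaces the parity counter and the list-of-single-element-lists mutated in place by a one-pass filter of the numeric characters followed by a loop that consumes and sums two digits at a time.
import Mathlib
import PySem

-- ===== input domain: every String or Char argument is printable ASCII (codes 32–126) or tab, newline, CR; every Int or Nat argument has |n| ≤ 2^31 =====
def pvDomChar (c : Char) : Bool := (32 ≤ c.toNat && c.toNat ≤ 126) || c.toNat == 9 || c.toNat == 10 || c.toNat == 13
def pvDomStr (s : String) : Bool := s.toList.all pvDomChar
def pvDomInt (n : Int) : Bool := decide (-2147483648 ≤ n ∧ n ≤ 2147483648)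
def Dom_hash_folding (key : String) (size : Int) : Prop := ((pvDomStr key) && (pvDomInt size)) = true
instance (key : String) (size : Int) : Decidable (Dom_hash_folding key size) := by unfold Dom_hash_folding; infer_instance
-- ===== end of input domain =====

-- B changes the decomposition (filter digits once, then sum two at a time) for simplicity; same cost.

-- ===== PORT A =====
-- while loop: state = (pairs, numbers); pairs kept as List (List Char) (Python's list of
-- one-element lists of digit strings, strings as char lists); pairs[len(pairs)-1][0] += c
-- is dropLast ++ [last ++ [c]] (the elif only runs with pairs nonempty, numbers odd).
def hash_folding (key : String) (size : Int) : Int :=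
  let st := key.toList.foldl (fun (st : List (List Char) × Int) c =>
      if PySem.Chars.isdigit c && (PySem.Int.mod (st.2 + 1) 2 != 0) then
        (st.1 ++ [[c]], st.2 + 1)
      else if PySem.Chars.isdigit c then
        (st.1.dropLast ++ [st.1.getLastD [] ++ [c]], st.2 + 1)
      else st) ([], 0)
  let string_sum := st.1.foldl (fun s p => s + (PySem.Int.ofChars? p).getD 0) 0
  PySem.Int.mod string_sum size
-- int(pair[0]) via ofChars?; getD 0 is never used: every pair is a nonempty digit string.

-- ===== PORT B =====
-- while digits: total += int(''.join(digits[:2])); digits = digits[2:]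
def pairSumLoop : List Char → Int → Int
  | [], total => total
  | [a], total => total + (PySem.Int.ofChars? [a]).getD 0
  | a :: b :: rest, total => pairSumLoop rest (total + (PySem.Int.ofChars? [a, b]).getD 0)

def hash_folding_alt (key : String) (size : Int) : Int :=
  let digits := key.toList.filter (fun c => PySem.Chars.isdigit c)
  PySem.Int.mod (pairSumLoop digits 0) size

-- ===== PRECONDITION & SPEC =====
-- Pre_ excludes size = 0, on which Python A raises ZeroDivisionError (B raises there too).
def Pre_hash_folding (key : String) (size : Int) : Prop := size ≠ 0
instance (key : String) (size : Int) : Decidable (Pre_hash_folding key size) := by unfold Pre_hash_folding; infer_instance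
def pvWitness_hash_folding : String × Int := ("(123) 456-7890", 7)

def Spec_hash_folding (key : String) (size : Int) (out : Int) : Prop := out = hash_folding_alt key size
instance (key : String) (size : Int) (out : Int) : Decidable (Spec_hash_folding key size out) := by unfold Spec_hash_folding; infer_instance

-- ===== CLAIM (what is proved, stated in full; the proofs are below) =====
def Claim_equal_hash_folding : Prop := ∀ (key : String) (size : Int), Dom_hash_folding key size → Pre_hash_folding key size → Spec_hash_folding key size (hash_folding key size)

-- ===== LEMMAS AND PROOFS =====

-- the list of two-digit chunks A's first loop builds
def chunk2 : List Char → List (List Char)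
  | [] => []
  | [a] => [[a]]
  | a :: b :: l => [a, b] :: chunk2 l

theorem list_two_ind {α : Type} {P : List α → Prop} (h0 : P [])
    (h1 : ∀ a, P [a]) (h2 : ∀ a b l, P l → P (a :: b :: l)) : ∀ l, P l
  | [] => h0
  | [a] => h1 a
  | a :: b :: l => h2 a b l (list_two_ind h0 h1 h2 l)

theorem chunk2_ne_nil (l : List Char) (h : l ≠ []) : chunk2 l ≠ [] := by
  match l with
  | [a] => simp [chunk2]
  | a :: b :: l => simp [chunk2]

theorem chunk2_snoc (ds : List Char) (c : Char) :
    chunk2 (ds ++ [c]) =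
      if ds.length % 2 = 0 then chunk2 ds ++ [[c]]
      else (chunk2 ds).dropLast ++ [(chunk2 ds).getLastD [] ++ [c]] := by
  induction ds using list_two_ind with
  | h0 => simp [chunk2]
  | h1 a => simp [chunk2]
  | h2 a b l ih =>
      simp only [List.cons_append, chunk2, ih, List.length_cons]
      have hmod : (l.length + 1 + 1) % 2 = l.length % 2 := by omega
      rw [hmod]
      by_cases h : l.length % 2 = 0
      · simp [h]
      · have hne : l ≠ [] := by intro hl; subst hl; simp at h
        have hc := chunk2_ne_nil l hne
        rw [if_neg h, if_neg h]
        cases hl : chunk2 l with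
        | nil => exact absurd hl hc
        | cons x xs => simp

-- A's first loop, starting from a state reached after consuming digits ds
theorem foldA_inv (cs : List Char) : ∀ ds : List Char,
    cs.foldl (fun (st : List (List Char) × Int) c =>
      if PySem.Chars.isdigit c && (PySem.Int.mod (st.2 + 1) 2 != 0) then
        (st.1 ++ [[c]], st.2 + 1)
      else if PySem.Chars.isdigit c then
        (st.1.dropLast ++ [st.1.getLastD [] ++ [c]], st.2 + 1)
      else st) (chunk2 ds, (ds.length : Int)) =
    (chunk2 (ds ++ cs.filter (fun c => PySem.Chars.isdigit c)),
     ((ds.length : Int) + ((cs.filter (fun c => PySem.Chars.isdigit c)).length : Int))) := by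
  induction cs with
  | nil => intro ds; simp
  | cons c cs ih =>
      intro ds
      by_cases hd : PySem.Chars.isdigit c
      · have hmod : PySem.Int.mod ((ds.length : Int) + 1) 2 =
            ((ds.length : Int) + 1) % 2 := PySem.Int.mod_eq_emod_of_pos (by omega : (0:Int) < 2)
        have hfil : List.filter (fun c => PySem.Chars.isdigit c) (c :: cs)
            = c :: List.filter (fun c => PySem.Chars.isdigit c) cs := by
          simp [hd]
        have hlen2 : (((c :: List.filter (fun c => PySem.Chars.isdigit c) cs).length : Int))
            = 1 + ((List.filter (fun c => PySem.Chars.isdigit c) cs).length : Int) := by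
          simp [List.length_cons]; omega
        have hds : ds ++ c :: List.filter (fun c => PySem.Chars.isdigit c) cs
            = (ds ++ [c]) ++ List.filter (fun c => PySem.Chars.isdigit c) cs := by
          simp
        have h2 := ih (ds ++ [c])
        have hlen : (((ds ++ [c]).length : Int)) = (ds.length : Int) + 1 := by
          simp
        rw [hlen] at h2
        by_cases hp : ds.length % 2 = 0
        · have hcond : (PySem.Int.mod ((ds.length : Int) + 1) 2 != 0) = true := by
            rw [hmod]; simp; omega
          rw [List.foldl_cons]
          simp only [hd, hcond, Bool.and_self, if_true]
          rw [chunk2_snoc, if_pos hp] at h2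
          rw [h2, hfil, hds, hlen2]
          ring_nf
        · have hcond : (PySem.Int.mod ((ds.length : Int) + 1) 2 != 0) = false := by
            rw [hmod]; simp; omega
          rw [List.foldl_cons]
          simp only [hd, hcond, Bool.and_false, Bool.false_eq_true, if_false, if_true]
          rw [chunk2_snoc, if_neg hp] at h2
          rw [h2, hfil, hds, hlen2]
          ring_nf
      · have hfil : List.filter (fun c => PySem.Chars.isdigit c) (c :: cs)
            = List.filter (fun c => PySem.Chars.isdigit c) cs := by
          simp [hd]
        rw [List.foldl_cons]
        simp only [hd, Bool.false_and, Bool.false_eq_true, if_false]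
        rw [ih ds, hfil]

-- summing A's chunk list equals B's two-at-a-time loop
theorem foldl_chunk2_eq_pairSumLoop (l : List Char) : ∀ t : Int,
    (chunk2 l).foldl (fun s p => s + (PySem.Int.ofChars? p).getD 0) t = pairSumLoop l t := by
  induction l using list_two_ind with
  | h0 => intro t; simp [chunk2, pairSumLoop]
  | h1 a => intro t; simp [chunk2, pairSumLoop]
  | h2 a b l ih => intro t; simp only [chunk2, List.foldl_cons, pairSumLoop, ih]

-- ===== VERDICT (by name: the statement is the Claim_ definition above) =====
theorem hash_folding_spec : Claim_equal_hash_folding := by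
  intro key size _ _
  unfold Spec_hash_folding hash_folding hash_folding_alt
  have h := foldA_inv key.toList []
  simp only [List.nil_append, List.length_nil, Int.natCast_zero, chunk2] at h
  simp only [h, foldl_chunk2_eq_pairSumLoop]
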